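-- pv_equiv track=rewrite | github.com/han-so1omon/ikam | packages/modelado/src/modelado/db.py | _convert_query
-- ===== SOURCE A (Python) =====
-- def _convert_query(sql: str) -> str:
--     """Convert SQLite-style '?' placeholders to PostgreSQL '%s'."""
--
--     result: list[str] = []
--     in_single = False
--     in_double = False
--     prev_char = ""
--     for ch in sql:
--         if ch == "'" and not in_double and prev_char != "\\":
--             in_single = not in_single
--         elif ch == '"' and not in_single and prev_char != "\\":
--             in_double = not in_double
--         if ch == "?" and not in_single and not in_double:
--             result.append("%s")
--         else:
--             result.append(ch)
--         prev_char = ch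
--     return "".join(result)
-- ===== SOURCE B (Python) =====
-- def _convert_query(sql: str) -> str:
--     """Convert SQLite-style '?' placeholders to PostgreSQL '%s'."""
--     out: list[str] = []
--     i, n = 0, len(sql)
--     while i < n:
--         c = sql[i]
--         if c == "?":
--             out.append("%s")
--             i += 1
--         elif c == "\\" and i + 1 < n and sql[i + 1] in "'\"":
--             # a quote right after a backslash never opens a string
--             out.append(sql[i:i + 2])
--             i += 2
--         elif c == "'" or c == '"':
--             # copy a whole quoted literal verbatim (escaped quote = quote
--             # immediately preceded by a backslash); unterminated -> to end
--             q = c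
--             out.append(c)
--             i += 1
--             while i < n:
--                 if sql[i] == "\\" and i + 1 < n and sql[i + 1] == q:
--                     out.append(sql[i:i + 2])
--                     i += 2
--                 elif sql[i] == q:
--                     out.append(q)
--                     i += 1
--                     break
--                 else:
--                     out.append(sql[i])
--                     i += 1
--         else:
--             out.append(c)
--             i += 1
--     return "".join(out)
-- ===== Notes on version B (the rewrite author's own statement) =====
-- stated objective: alternative
-- what changed: Replaced the flag-based character state machine (in_single/in_double/prev_char toggles per character) with a recursive-descent scanner that consumes backslash+quote pairs and whole quoted literals verbatim and rewrites bare question-mark placeholders only at top level.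
import Mathlib
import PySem

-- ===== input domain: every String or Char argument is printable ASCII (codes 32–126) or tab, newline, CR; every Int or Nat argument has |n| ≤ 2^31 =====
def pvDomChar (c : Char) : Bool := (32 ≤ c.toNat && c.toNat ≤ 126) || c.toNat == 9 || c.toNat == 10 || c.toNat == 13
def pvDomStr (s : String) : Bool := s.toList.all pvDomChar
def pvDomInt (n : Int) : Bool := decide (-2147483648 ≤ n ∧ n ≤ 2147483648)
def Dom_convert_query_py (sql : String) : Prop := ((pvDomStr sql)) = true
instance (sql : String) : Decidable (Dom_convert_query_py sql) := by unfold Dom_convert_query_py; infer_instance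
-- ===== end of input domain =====

-- B replaces A's per-character flag state machine with a recursive-descent scanner
-- that consumes quoted literals whole; equal return value on the whole domain.

-- ===== PORT A =====
-- the for-loop of A as structural recursion over the characters; state:
-- in_single s, in_double d, prev_char p (a String, "" before the first char)
def aGo : List Char → Bool → Bool → String → String
  | [], _, _, _ => ""
  | ch :: rest, s, d, p =>
    let sd : Bool × Bool :=
      if ch == '\'' && !d && p != "\\" then (!s, d)
      else if ch == '"' && !s && p != "\\" then (s, !d)
      else (s, d)
    let piece : String :=
      if ch == '?' && !sd.1 && !sd.2 then "%s" else String.singleton ch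
    piece ++ aGo rest sd.1 sd.2 (String.singleton ch)

def convert_query_py (sql : String) : String := aGo sql.toList false false ""

-- ===== PORT B =====
-- Source B's outer while loop = altGo; its inner literal-copying loop = strLit q
mutual
def altGo : List Char → List Char
  | [] => []
  | '?' :: rest => '%' :: 's' :: altGo rest
  | '\\' :: '\'' :: rest => '\\' :: '\'' :: altGo rest
  | '\\' :: '"' :: rest => '\\' :: '"' :: altGo rest
  | '\'' :: rest => '\'' :: strLit '\'' rest
  | '"' :: rest => '"' :: strLit '"' rest
  | c :: rest => c :: altGo rest
  termination_by l => l.length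

def strLit (q : Char) : List Char → List Char
  | [] => []
  | '\\' :: c :: rest =>
      if c = q then '\\' :: c :: strLit q rest
      else '\\' :: strLit q (c :: rest)
  | c :: rest =>
      if c = q then c :: altGo rest
      else c :: strLit q rest
  termination_by l => l.length
end

def convert_query_py_alt (sql : String) : String := String.ofList (altGo sql.toList)

-- ===== PRECONDITION & SPEC =====
def Spec_convert_query_py (sql : String) (out : String) : Prop := out = convert_query_py_alt sql
instance (sql : String) (out : String) : Decidable (Spec_convert_query_py sql out) := by unfold Spec_convert_query_py; infer_instance

-- ===== CLAIM (what is proved, stated in full; the proofs are below) =====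
def Claim_equal_convert_query_py : Prop := ∀ (sql : String), Dom_convert_query_py sql → Spec_convert_query_py sql (convert_query_py sql)

-- ===== LEMMAS AND PROOFS =====

theorem singleton_ne_backslash (c : Char) (h : c ≠ '\\') : String.singleton c ≠ "\\" :=
  fun hcon => h (by simpa using congrArg String.toList hcon)

theorem singleton_backslash : String.singleton '\\' = "\\" := by decide

-- one-step unfolding of aGo on a cons cell
theorem aGo_cons (ch : Char) (rest : List Char) (s d : Bool) (p : String) :
    aGo (ch :: rest) s d p =
    (if ch == '?' && !(if ch == '\'' && !d && p != "\\" then (!s, d)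
      else if ch == '"' && !s && p != "\\" then (s, !d) else (s, d)).1 &&
      !(if ch == '\'' && !d && p != "\\" then (!s, d)
      else if ch == '"' && !s && p != "\\" then (s, !d) else (s, d)).2 then "%s" else String.singleton ch) ++
    aGo rest (if ch == '\'' && !d && p != "\\" then (!s, d)
      else if ch == '"' && !s && p != "\\" then (s, !d) else (s, d)).1
      (if ch == '\'' && !d && p != "\\" then (!s, d)
      else if ch == '"' && !s && p != "\\" then (s, !d) else (s, d)).2 (String.singleton ch) := rfl

theorem key : ∀ (n : Nat) (l : List Char), l.length ≤ n →
    (∀ p : String, (p = "\\" → ∀ c ∈ l.head?, c ≠ '\'' ∧ c ≠ '"') →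
        (aGo l false false p).toList = altGo l) ∧
    (∀ p : String, (p = "\\" → ∀ c ∈ l.head?, c ≠ '\'') →
        (aGo l true false p).toList = strLit '\'' l) ∧
    (∀ p : String, (p = "\\" → ∀ c ∈ l.head?, c ≠ '"') →
        (aGo l false true p).toList = strLit '"' l) := by
  intro n
  induction n with
  | zero =>
    intro l hl
    have : l = [] := List.eq_nil_of_length_eq_zero (Nat.le_zero.mp hl)
    subst this
    refine ⟨?_, ?_, ?_⟩ <;> intro p _ <;> simp [aGo, altGo, strLit]
  | succ n ih =>
    intro l hl
    match l with
    | [] => refine ⟨?_, ?_, ?_⟩ <;> intro p _ <;> simp [aGo, altGo, strLit]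
    | ch :: rest =>
      have hr : rest.length ≤ n := by simpa using Nat.succ_le_succ_iff.mp (by simpa using hl)
      refine ⟨?_, ?_, ?_⟩
      · -- top level
        intro p hp
        by_cases h1 : ch = '\''
        · subst h1
          have hpne : p ≠ "\\" := fun hpp => ((hp hpp '\'' (by simp)).1 rfl)
          rw [aGo_cons, altGo]
          simp [hpne, (ih rest hr).2.1 (String.singleton '\'')
            (fun hpp => absurd hpp (singleton_ne_backslash _ (by decide)))]
        · by_cases h2 : ch = '"'
          · subst h2
            have hpne : p ≠ "\\" := fun hpp => ((hp hpp '"' (by simp)).2 rfl)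
            rw [aGo_cons, altGo]
            simp [hpne, (ih rest hr).2.2 (String.singleton '"')
              (fun hpp => absurd hpp (singleton_ne_backslash _ (by decide)))]
          · by_cases h3 : ch = '?'
            · subst h3
              rw [aGo_cons, altGo]
              simp [(ih rest hr).1 (String.singleton '?')
                (fun hpp => absurd hpp (singleton_ne_backslash _ (by decide)))]
            · by_cases h4 : ch = '\\'
              · subst h4
                match rest with
                | [] => simp [aGo, altGo]
                | c2 :: r2 =>
                  have hr2' : r2.length ≤ n := by simp at hr; omega
                  by_cases hc2 : c2 = '\''
                  · subst hc2
                    rw [aGo_cons, aGo_cons, altGo]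
                    simp [singleton_backslash, (ih r2 hr2').1 (String.singleton '\'')
                      (fun hpp => absurd hpp (singleton_ne_backslash _ (by decide)))]
                  · by_cases hc2' : c2 = '"'
                    · subst hc2'
                      rw [aGo_cons, aGo_cons, altGo]
                      simp [singleton_backslash, (ih r2 hr2').1 (String.singleton '"')
                        (fun hpp => absurd hpp (singleton_ne_backslash _ (by decide)))]
                    · rw [aGo_cons, altGo]
                      simp [
                        (ih (c2 :: r2) hr).1 (String.singleton '\\')
                          (by intro _ c hc; simp at hc; subst hc; exact ⟨hc2, hc2'⟩)]
                      all_goals (intros; simp_all)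
              · -- ordinary char
                rw [aGo_cons, altGo]
                simp [h1, h2, h3,
                  (ih rest hr).1 (String.singleton ch)
                    (fun hpp => absurd hpp (singleton_ne_backslash _ h4))]
                all_goals (intros; simp_all)
      · -- inside single-quoted literal
        intro p hp
        by_cases h1 : ch = '\''
        · subst h1
          have hpne : p ≠ "\\" := fun hpp => (hp hpp '\'' (by simp)) rfl
          rw [aGo_cons, strLit]
          simp [hpne, (ih rest hr).1 (String.singleton '\'')
            (fun hpp => absurd hpp (singleton_ne_backslash _ (by decide)))]
          all_goals (intros; simp_all)
        · by_cases h4 : ch = '\\'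
          · subst h4
            match rest with
            | [] => simp [aGo, strLit]
            | c2 :: r2 =>
              have hr2' : r2.length ≤ n := by simp at hr; omega
              by_cases hc2 : c2 = '\''
              · subst hc2
                rw [aGo_cons, aGo_cons, strLit]
                simp [singleton_backslash, (ih r2 hr2').2.1 (String.singleton '\'')
                  (fun hpp => absurd hpp (singleton_ne_backslash _ (by decide)))]
              · rw [aGo_cons, strLit]
                simp [hc2,
                  (ih (c2 :: r2) hr).2.1 (String.singleton '\\')
                    (by intro _ c hc; simp at hc; subst hc; exact hc2)]
          · rw [aGo_cons, strLit]
            simp [h1,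
              (ih rest hr).2.1 (String.singleton ch)
                (fun hpp => absurd hpp (singleton_ne_backslash _ h4))]
            all_goals (intros; simp_all)
      · -- inside double-quoted literal
        intro p hp
        by_cases h1 : ch = '"'
        · subst h1
          have hpne : p ≠ "\\" := fun hpp => (hp hpp '"' (by simp)) rfl
          rw [aGo_cons, strLit]
          simp [hpne, (ih rest hr).1 (String.singleton '"')
            (fun hpp => absurd hpp (singleton_ne_backslash _ (by decide)))]
          all_goals (intros; simp_all)
        · by_cases h4 : ch = '\\'
          · subst h4
            match rest with
            | [] => simp [aGo, strLit]
            | c2 :: r2 =>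
              have hr2' : r2.length ≤ n := by simp at hr; omega
              by_cases hc2 : c2 = '"'
              · subst hc2
                rw [aGo_cons, aGo_cons, strLit]
                simp [singleton_backslash, (ih r2 hr2').2.2 (String.singleton '"')
                  (fun hpp => absurd hpp (singleton_ne_backslash _ (by decide)))]
              · rw [aGo_cons, strLit]
                simp [hc2,
                  (ih (c2 :: r2) hr).2.2 (String.singleton '\\')
                    (by intro _ c hc; simp at hc; subst hc; exact hc2)]
          · rw [aGo_cons, strLit]
            simp [h1,
              (ih rest hr).2.2 (String.singleton ch)
                (fun hpp => absurd hpp (singleton_ne_backslash _ h4))]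
            all_goals (intros; simp_all)

theorem convert_query_py_spec : Claim_equal_convert_query_py := by
  intro sql _
  unfold Spec_convert_query_py convert_query_py convert_query_py_alt
  apply String.toList_injective
  simpa using (key sql.toList.length sql.toList le_rfl).1 "" (by simp)

-- ===== VERDICT =====
-- (the verdict theorem convert_query_py_spec is stated above, proved by claim name)
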